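-- pv_equiv track=rewrite | github.com/beauthi/contests | BattleDev/112020_0/test.py | get_all_children_string
-- ===== SOURCE A (Python) =====
-- def get_all_children_string(s):
--     """
--         gets all 2-partitions of the string s
--     """
--     children = set()
--     for bitmask in range(2**len(s)-1):
--         taken, left = [], []
--         b = 1
--         for i in range(len(s)):
--             if (b & bitmask) == 0:
--                 left += [s[i]]
--             else:
--                 taken += [s[i]]
--             b *= 2
--         children.add(("".join(taken), "".join(left)))
--     return children
-- ===== SOURCE B (Python) =====
-- def get_all_children_string(s):
--     # doubling construction: extend every partial partition by each next char
--     pairs = [([], [])]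
--     for c in s:
--         pairs = [(t, l + [c]) for (t, l) in pairs] + [(t + [c], l) for (t, l) in pairs]
--     children = {("".join(t), "".join(l)) for (t, l) in pairs}
--     children.discard((s, ""))
--     return children
-- ===== Notes on version B (the rewrite author's own statement) =====
-- stated objective: alternative
-- what changed: Replaces A's enumeration of 2^n bitmasks with an inner per-character bit-test loop by a doubling construction that extends every partial partition by each successive character on either side, then discards the single all-taken pair (s, '').
import Mathlib
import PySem

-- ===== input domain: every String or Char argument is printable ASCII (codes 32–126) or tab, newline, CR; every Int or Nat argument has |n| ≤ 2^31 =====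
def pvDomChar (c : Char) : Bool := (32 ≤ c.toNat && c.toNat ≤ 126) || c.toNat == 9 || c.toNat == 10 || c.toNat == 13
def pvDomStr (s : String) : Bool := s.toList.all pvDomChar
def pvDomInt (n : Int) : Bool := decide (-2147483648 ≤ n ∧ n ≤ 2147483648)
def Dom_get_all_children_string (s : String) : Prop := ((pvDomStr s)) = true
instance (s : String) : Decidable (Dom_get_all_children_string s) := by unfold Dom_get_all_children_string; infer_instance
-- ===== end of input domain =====

-- B replaces A's bitmask enumeration by a doubling construction (extend every partial
-- partition by each next character on either side) and one final discard of (s, "");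
-- objective: alternative (same return value, genuinely different algorithm).

-- ===== PORT A =====
def get_all_children_string (s : String) : List (String × String) :=
  (PySem.List.pyRange 0 (2 ^ (PySem.Str.len s).toNat - 1)).foldl
    (fun children bitmask =>
      let r := (PySem.List.pyRange 0 (PySem.Str.len s)).foldl
        (fun (st : List Char × List Char × Int) i =>
          if PySem.Int.band st.2.2 bitmask == 0 then
            (st.1, st.2.1 ++ [PySem.List.pyGetD s.toList i ' '], st.2.2 * 2)
          else
            (st.1 ++ [PySem.List.pyGetD s.toList i ' '], st.2.1, st.2.2 * 2))
        (([] : List Char), ([] : List Char), (1 : Int))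
      PySem.Set.add children (String.ofList r.1, String.ofList r.2.1))
    PySem.Set.empty

-- ===== PORT B =====
def get_all_children_string_alt (s : String) : List (String × String) :=
  let pairs := s.toList.foldl
    (fun acc c =>
      acc.map (fun p => (p.1, p.2 ++ [c])) ++ acc.map (fun p => (p.1 ++ [c], p.2)))
    [(([] : List Char), ([] : List Char))]
  PySem.Set.discard
    (PySem.Set.ofList (pairs.map (fun p => (String.ofList p.1, String.ofList p.2))))
    (s, "")

-- ===== PRECONDITION & SPEC =====
def Spec_get_all_children_string (s : String) (out : List (String × String)) : Prop := out = get_all_children_string_alt s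
instance (s : String) (out : List (String × String)) : Decidable (Spec_get_all_children_string s out) := by unfold Spec_get_all_children_string; infer_instance

-- ===== CLAIM (what is proved, stated in full; the proofs are below) =====
def Claim_equal_get_all_children_string : Prop := ∀ (s : String), Dom_get_all_children_string s → Spec_get_all_children_string s (get_all_children_string s)

-- ===== LEMMAS AND PROOFS =====

/-- The partition of `cs` selected by the bits `e, e+1, …` of the mask `m`
(first component: bit set, second: bit clear). -/
def pvQ : List Char → Nat → Nat → List Char × List Char
  | [], _, _ => ([], [])
  | c :: rest, m, e =>
    let r := pvQ rest m (e + 1)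
    if m.testBit e then (c :: r.1, r.2) else (r.1, c :: r.2)

/-- The (taken, left) string pair of mask `m`. -/
def pvF (cs : List Char) (m : Nat) : String × String :=
  (String.ofList (pvQ cs m 0).1, String.ofList (pvQ cs m 0).2)

lemma pv_inner (m : Nat) : ∀ (cs t l : List Char) (e : Nat),
    List.foldl (fun (st : List Char × List Char × Int) c =>
        if PySem.Int.band st.2.2 (m : Int) == 0 then (st.1, st.2.1 ++ [c], st.2.2 * 2)
        else (st.1 ++ [c], st.2.1, st.2.2 * 2))
      (t, l, (2 : Int) ^ e) cs
    = (t ++ (pvQ cs m e).1, l ++ (pvQ cs m e).2, (2 : Int) ^ (e + cs.length)) := by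
  intro cs
  induction cs with
  | nil => intro t l e; simp [pvQ]
  | cons c rest ih =>
    intro t l e
    have hcast : ((2 : Int) ^ e) = ((2 ^ e : Nat) : Int) := by push_cast; ring
    have hb : (PySem.Int.band ((2 : Int) ^ e) (m : Int) == 0) = !m.testBit e := by
      rw [hcast, PySem.Int.band_natCast, Nat.two_pow_and]
      cases h : m.testBit e <;> simp
    have hpow : (2 : Int) ^ e * 2 = (2 : Int) ^ (e + 1) := by ring
    have harith : e + (c :: rest).length = (e + 1) + rest.length := by simp; omega
    by_cases h : m.testBit e
    · simp only [List.foldl_cons, hb, h, Bool.not_true, Bool.false_eq_true, if_false, hpow,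
        ih, pvQ, harith]
      simp
    · simp only [List.foldl_cons, hb, h, Bool.not_false, if_true, hpow, ih, pvQ, harith]
      simp

lemma pv_A_mask (s : String) (k : Nat) :
    ((PySem.List.pyRange 0 (PySem.Str.len s)).foldl
      (fun (st : List Char × List Char × Int) i =>
        if PySem.Int.band st.2.2 ((k : Nat) : Int) == 0 then
          (st.1, st.2.1 ++ [PySem.List.pyGetD s.toList i ' '], st.2.2 * 2)
        else
          (st.1 ++ [PySem.List.pyGetD s.toList i ' '], st.2.1, st.2.2 * 2))
      (([] : List Char), ([] : List Char), (1 : Int)))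
    = ((pvQ s.toList k 0).1, (pvQ s.toList k 0).2, (2 : Int) ^ s.toList.length) := by
  have hlen : PySem.Str.len s = ((s.toList.length : Nat) : Int) := by
    simp [PySem.Str.len_eq]
  rw [hlen]
  have h1 := PySem.List.foldl_pyRange_zero_pyGetD' s.toList ' '
    (fun (st : List Char × List Char × Int) c =>
      if PySem.Int.band st.2.2 ((k : Nat) : Int) == 0 then (st.1, st.2.1 ++ [c], st.2.2 * 2)
      else (st.1 ++ [c], st.2.1, st.2.2 * 2))
    (([] : List Char), ([] : List Char), (1 : Int))
  have h2 := pv_inner k s.toList [] [] 0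
  simp only [List.nil_append, Nat.zero_add] at h2
  exact h1.trans h2

lemma pvQ_append : ∀ (ds : List Char) (c : Char) (m e : Nat),
    pvQ (ds ++ [c]) m e =
      if m.testBit (e + ds.length) then ((pvQ ds m e).1 ++ [c], (pvQ ds m e).2)
      else ((pvQ ds m e).1, (pvQ ds m e).2 ++ [c]) := by
  intro ds
  induction ds with
  | nil => intro c m e; simp [pvQ]
  | cons d ds ih =>
    intro c m e
    have harith : e + (d :: ds).length = (e + 1) + ds.length := by simp; omega
    simp only [List.cons_append, pvQ, ih c m (e + 1), harith]
    by_cases h1 : m.testBit ((e + 1) + ds.length) <;> by_cases h2 : m.testBit e <;>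
      simp [h1, h2]

lemma pvQ_congr : ∀ (cs : List Char) (m m' e : Nat),
    (∀ j, j < cs.length → m.testBit (e + j) = m'.testBit (e + j)) →
    pvQ cs m e = pvQ cs m' e := by
  intro cs
  induction cs with
  | nil => intro m m' e _; rfl
  | cons c rest ih =>
    intro m m' e h
    have h0 : m.testBit e = m'.testBit e := by have := h 0 (by simp); simpa using this
    have hr : pvQ rest m (e + 1) = pvQ rest m' (e + 1) := by
      apply ih
      intro j hj
      have := h (j + 1) (by simp; omega)
      simpa [Nat.add_assoc, Nat.add_comm 1 j] using this
    simp [pvQ, h0, hr]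

lemma pvQ_all_true : ∀ (cs : List Char) (m e : Nat),
    (∀ j, j < cs.length → m.testBit (e + j) = true) → pvQ cs m e = (cs, []) := by
  intro cs
  induction cs with
  | nil => intro m e _; rfl
  | cons c rest ih =>
    intro m e h
    have h0 : m.testBit e = true := by have := h 0 (by simp); simpa using this
    have hr : pvQ rest m (e + 1) = (rest, []) := by
      apply ih
      intro j hj
      have := h (j + 1) (by simp; omega)
      simpa [Nat.add_assoc, Nat.add_comm 1 j] using this
    simp [pvQ, h0, hr]

lemma pvQ_snd_nil : ∀ (cs : List Char) (m e : Nat),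
    (pvQ cs m e).2 = [] → ∀ j, j < cs.length → m.testBit (e + j) = true := by
  intro cs
  induction cs with
  | nil => intro m e _ j hj; simp at hj
  | cons c rest ih =>
    intro m e hnil j hj
    by_cases h0 : m.testBit e
    · rcases j with _ | j
      · simpa using h0
      · have : (pvQ rest m (e + 1)).2 = [] := by
          simp [pvQ, h0] at hnil; exact hnil
        have := ih m (e + 1) this j (by simpa using Nat.lt_of_succ_lt_succ hj)
        simpa [Nat.add_assoc, Nat.add_comm 1 j] using this
    · simp [pvQ, h0] at hnil
lemma pv_full : ∀ cs : List Char,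
    cs.foldl (fun acc c =>
        acc.map (fun p => (p.1, p.2 ++ [c])) ++ acc.map (fun p => (p.1 ++ [c], p.2)))
      [(([] : List Char), ([] : List Char))]
    = (List.range (2 ^ cs.length)).map (fun m => pvQ cs m 0) := by
  intro cs
  induction cs using List.reverseRecOn with
  | nil => simp [pvQ]
  | append_singleton ds c ih =>
    rw [List.foldl_append, ih]
    have hsplit : 2 ^ (ds ++ [c]).length = 2 ^ ds.length + 2 ^ ds.length := by
      simp [pow_succ]; ring
    rw [hsplit, List.range_add, List.map_append, List.foldl_cons, List.foldl_nil,
      List.map_map, List.map_map]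
    congr 1
    · apply List.map_congr_left
      intro m hm
      have hm' : m < 2 ^ ds.length := List.mem_range.mp hm
      have hbit : m.testBit ds.length = false := Nat.testBit_lt_two_pow hm'
      simp [Function.comp, pvQ_append, hbit]
    · rw [List.map_map]
      apply List.map_congr_left
      intro m hm
      have hm' : m < 2 ^ ds.length := List.mem_range.mp hm
      have hbit0 : m.testBit ds.length = false := Nat.testBit_lt_two_pow hm'
      have hbit : (2 ^ ds.length + m).testBit ds.length = true := by
        rw [Nat.testBit_two_pow_add_eq, hbit0]; rfl
      have hlow : pvQ ds (2 ^ ds.length + m) 0 = pvQ ds m 0 := by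
        apply pvQ_congr
        intro j hj
        simpa using Nat.testBit_two_pow_add_gt hj m
      simp [Function.comp, pvQ_append, hbit, hlow]

lemma pv_discard_add_self {α : Type} [BEq α] [LawfulBEq α]
    (s : PySem.Set α) (x : α) (h : x ∉ s) :
    PySem.Set.discard (PySem.Set.add s x) x = s := by
  have hc : PySem.Set.contains s x = false := by
    cases hcb : PySem.Set.contains s x with
    | false => rfl
    | true =>
      have hcb' : List.contains s x = true := hcb
      exact absurd (List.contains_iff_mem.mp hcb') h
  simp only [PySem.Set.add, hc, Bool.false_eq_true, if_false, PySem.Set.discard]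
  rw [List.filter_append]
  have h1 : List.filter (fun y => !y == x) s = s := by
    apply List.filter_eq_self.mpr
    intro y hy
    have hyx : y ≠ x := fun hyx => h (hyx ▸ hy)
    simp [hyx]
  have h2 : List.filter (fun y => !y == x) [x] = [] := by simp
  rw [h1, h2, List.append_nil]

lemma pv_last_mask (s : String) :
    pvF s.toList (2 ^ s.toList.length - 1) = (s, "") := by
  have hall : pvQ s.toList (2 ^ s.toList.length - 1) 0 = (s.toList, []) := by
    apply pvQ_all_true
    intro j hj
    rw [Nat.zero_add, Nat.testBit_two_pow_sub_one]
    exact decide_eq_true hj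
  unfold pvF
  rw [hall]
  show (String.ofList s.toList, String.ofList []) = (s, "")
  rw [String.ofList_toList]

lemma pv_not_mem (s : String) (m : Nat) (hm : m < 2 ^ s.toList.length - 1) :
    pvF s.toList m ≠ (s, "") := by
  intro heq
  have hsnd : String.ofList (pvQ s.toList m 0).2 = "" := congrArg Prod.snd heq
  have hnil : (pvQ s.toList m 0).2 = [] := by
    have := congrArg String.toList hsnd
    simpa [String.toList_ofList] using this
  have hall := pvQ_snd_nil s.toList m 0 hnil
  have hme : m = 2 ^ s.toList.length - 1 := by
    apply Nat.eq_of_testBit_eq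
    intro i
    rw [Nat.testBit_two_pow_sub_one]
    by_cases hi : i < s.toList.length
    · have h2 := hall i hi
      rw [Nat.zero_add] at h2
      rw [h2, decide_eq_true hi]
    · have h1 : m < 2 ^ i := by
        calc m < 2 ^ s.toList.length := by omega
        _ ≤ 2 ^ i := Nat.pow_le_pow_right (by norm_num) (by omega)
      rw [Nat.testBit_lt_two_pow h1, decide_eq_false hi]
  omega

lemma pv_main (s : String) :
    get_all_children_string s = get_all_children_string_alt s := by
  have hone : (1 : Nat) ≤ 2 ^ s.toList.length := Nat.one_le_two_pow
  have hsl : s.length = s.toList.length := by simp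
  have hlen : (PySem.Str.len s).toNat = s.toList.length := by
    rw [PySem.Str.len_eq]
    omega
  have hintN : ((2 : Int) ^ (PySem.Str.len s).toNat - 1 - 0).toNat
      = 2 ^ s.toList.length - 1 := by
    rw [hlen]
    have : ((2 : Int) ^ s.toList.length) = ((2 ^ s.toList.length : Nat) : Int) := by
      push_cast; ring
    omega
  have hA : get_all_children_string s =
      PySem.Set.ofList ((List.range (2 ^ s.toList.length - 1)).map (pvF s.toList)) := by
    rw [get_all_children_string, PySem.List.pyRange_one 0 ((2 : Int) ^ (PySem.Str.len s).toNat - 1), hintN, List.foldl_map,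
      PySem.Set.ofList_eq_foldl, List.foldl_map]
    apply List.foldl_ext
    intro acc k _
    simp only [Int.zero_add]
    rw [pv_A_mask s k]
    rfl
  have hB : get_all_children_string_alt s =
      PySem.Set.discard
        (PySem.Set.ofList ((List.range (2 ^ s.toList.length)).map (pvF s.toList)))
        (s, "") := by
    rw [get_all_children_string_alt]
    rw [pv_full s.toList, List.map_map]
    rfl
  rw [hA, hB]
  have hrange : List.range (2 ^ s.toList.length)
      = List.range (2 ^ s.toList.length - 1) ++ [2 ^ s.toList.length - 1] := by
    have h : 2 ^ s.toList.length = (2 ^ s.toList.length - 1) + 1 := by omega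
    rw [h, List.range_succ]
    simp
  rw [hrange, List.map_append, List.map_singleton, PySem.Set.ofList_append_singleton,
    pv_last_mask s]
  rw [pv_discard_add_self]
  intro hmem
  have hmem' : (s, "") ∈ (List.range (2 ^ s.toList.length - 1)).map (pvF s.toList) :=
    (PySem.Set.mem_ofList _ _).mp hmem
  rcases List.mem_map.mp hmem' with ⟨m, hmr, hfe⟩
  exact pv_not_mem s m (List.mem_range.mp hmr) hfe

-- ===== VERDICT (by name: the statement is the Claim_ definition above) =====
theorem get_all_children_string_spec : Claim_equal_get_all_children_string := by
  intro s _
  unfold Spec_get_all_children_string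
  exact pv_main s
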